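-- pv_equiv track=rewrite | github.com/Jamesvuong2/ISADass | frequencyfinder.py | get_colour_from_frequency
-- ===== SOURCE A (Python) =====
-- def get_colour_from_frequency(frequency):
--     """
--     Determines the colour produced by a given frequency.
--     """
--     colours = {
--         "violet": (670, 790),
--         "blue": (620, 669),
--         "cyan": (600, 619),
--         "green": (530, 599),
--         "yellow": (510, 529),
--         "orange": (480, 509),
--         "red": (400, 479),
--     }
--
--     # Checks the bounds of the frequency
--     for colour, (lower, upper) in colours.items():
--         if lower <= frequency <= upper:
--             return colour
--
--     if frequency > 790:
--         return "Frequency is higher than violet."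
--     elif frequency < 400:
--         return "Frequency is lower than red."
--     else:
--         return "Out of Range"
-- ===== SOURCE B (Python) =====
-- def get_colour_from_frequency(frequency):
--     """
--     Determines the colour produced by a given frequency
--     via binary search over the band lower bounds.
--     """
--     lowers = [400, 480, 510, 530, 600, 620, 670]
--     uppers = [479, 509, 529, 599, 619, 669, 790]
--     colours = ["red", "orange", "yellow", "green", "cyan", "blue", "violet"]
--
--     if frequency > 790:
--         return "Frequency is higher than violet."
--     if frequency < 400:
--         return "Frequency is lower than red."
--
--     # bisect_right by hand: lo = number of lower bounds <= frequency
--     lo, hi = 0, len(lowers)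
--     while lo < hi:
--         mid = (lo + hi) // 2
--         if lowers[mid] <= frequency:
--             lo = mid + 1
--         else:
--             hi = mid
--     i = lo - 1
--     if i >= 0 and frequency <= uppers[i]:
--         return colours[i]
--     return "Out of Range"
-- ===== Notes on version B (the rewrite author's own statement) =====
-- stated objective: alternative
-- what changed: Replaced the linear scan over a hard-coded dict of (lower, upper) bands with a hand-written bisect_right binary search over a sorted lower-bound array plus an upper-bound verification, with the out-of-band guards hoisted to the front.
import Mathlib
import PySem

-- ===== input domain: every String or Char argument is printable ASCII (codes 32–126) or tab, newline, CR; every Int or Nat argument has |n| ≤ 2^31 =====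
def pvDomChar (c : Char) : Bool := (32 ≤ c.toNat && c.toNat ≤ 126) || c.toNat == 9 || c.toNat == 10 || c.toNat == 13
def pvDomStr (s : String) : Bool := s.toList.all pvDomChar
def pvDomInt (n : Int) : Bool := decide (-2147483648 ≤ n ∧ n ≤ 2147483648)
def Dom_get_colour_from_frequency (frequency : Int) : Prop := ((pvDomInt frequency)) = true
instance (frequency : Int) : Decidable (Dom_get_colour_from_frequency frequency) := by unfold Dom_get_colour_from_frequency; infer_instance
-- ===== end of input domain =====

-- B replaces A's linear scan over the band dict with a binary search (bisect_right)
-- over the sorted lower bounds plus an upper-bound check; alternative structure, same values.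

-- ===== PORT A =====
-- A iterates over the literal dict's items in insertion order, returning the first
-- colour whose band contains the frequency; ported as structural recursion over that list.
def pvScanBands (frequency : Int) : List (String × Int × Int) → Option String
  | [] => none
  | (colour, lower, upper) :: rest =>
      if lower ≤ frequency ∧ frequency ≤ upper then some colour
      else pvScanBands frequency rest

def get_colour_from_frequency (frequency : Int) : String :=
  match pvScanBands frequency
      [("violet", 670, 790), ("blue", 620, 669), ("cyan", 600, 619),
       ("green", 530, 599), ("yellow", 510, 529), ("orange", 480, 509),
       ("red", 400, 479)] with
  | some colour => colour
  | none =>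
      if frequency > 790 then "Frequency is higher than violet."
      else if frequency < 400 then "Frequency is lower than red."
      else "Out of Range"

-- ===== PORT B =====
-- bisect_right while-loop; mid is always in range, so getD is exact for lowers[mid].
def pvBisect (lowers : List Int) (frequency : Int) (lo hi : Nat) : Nat :=
  if h : lo < hi then
    let mid := (lo + hi) / 2
    if lowers.getD mid 0 ≤ frequency then pvBisect lowers frequency (mid + 1) hi
    else pvBisect lowers frequency lo mid
  else lo
termination_by hi - lo
decreasing_by all_goals omega

def get_colour_from_frequency_alt (frequency : Int) : String :=
  let lowers : List Int := [400, 480, 510, 530, 600, 620, 670]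
  let uppers : List Int := [479, 509, 529, 599, 619, 669, 790]
  let colours : List String := ["red", "orange", "yellow", "green", "cyan", "blue", "violet"]
  if frequency > 790 then "Frequency is higher than violet."
  else if frequency < 400 then "Frequency is lower than red."
  else
    let lo := pvBisect lowers frequency 0 lowers.length
    let i := lo - 1
    if 1 ≤ lo ∧ frequency ≤ uppers.getD i 0 then colours.getD i ""
    else "Out of Range"

-- ===== PRECONDITION & SPEC =====
def Spec_get_colour_from_frequency (frequency : Int) (out : String) : Prop := out = get_colour_from_frequency_alt frequency
instance (frequency : Int) (out : String) : Decidable (Spec_get_colour_from_frequency frequency out) := by unfold Spec_get_colour_from_frequency; infer_instance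

-- ===== CLAIM (what is proved, stated in full; the proofs are below) =====
def Claim_equal_get_colour_from_frequency : Prop := ∀ (frequency : Int), Dom_get_colour_from_frequency frequency → Spec_get_colour_from_frequency frequency (get_colour_from_frequency frequency)

-- ===== LEMMAS AND PROOFS =====

-- Closed-form value of the binary search on the concrete lower-bound list.
theorem pvBisect_eval (f : Int) :
    pvBisect [400, 480, 510, 530, 600, 620, 670] f 0 7 =
      if f < 400 then 0 else if f < 480 then 1 else if f < 510 then 2
      else if f < 530 then 3 else if f < 600 then 4 else if f < 620 then 5
      else if f < 670 then 6 else 7 := by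
  split_ifs <;> (simp [pvBisect, List.getD]; split_ifs <;> omega)

-- ===== VERDICT (by name: the statement is the Claim_ definition above) =====
set_option maxHeartbeats 2000000 in
theorem get_colour_from_frequency_spec : Claim_equal_get_colour_from_frequency := by
  intro f _
  unfold Spec_get_colour_from_frequency get_colour_from_frequency get_colour_from_frequency_alt
  simp only [pvScanBands, List.length_cons, List.length_nil, Nat.reduceAdd, pvBisect_eval, List.getD]
  split_ifs <;> first | rfl | omega | (simp_all; try omega)
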